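-- pv_equiv track=rewrite | github.com/obscurainvera/solportprod | actions/portfolio/PortfolioTaggerAction.py | separateStaticAndDynamicTags
-- ===== SOURCE A (Python) =====
-- from typing import List, Set, Dict
--
-- def separateStaticAndDynamicTags(tags: Set[str]) -> Dict[str, Set[str]]:
--     """
--     Separate static and dynamic tags based on tag format
--
--     Args:
--         tags: Set of tags to separate
--
--     Returns:
--         Dict with 'static' and 'dynamic' keys containing respective sets of tags
--     """
--     staticTags = set()
--     dynamicTags = set()
--
--     for tag in tags:
--         # Dynamic tags start with [ and contain : characters
--         if tag.startswith('[') and ':' in tag: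
--             dynamicTags.add(tag)
--         else:
--             staticTags.add(tag)
--
--     return {
--         'static': staticTags,
--         'dynamic': dynamicTags
--     }
-- ===== SOURCE B (Python) =====
-- def separateStaticAndDynamicTags(tags):
--     """Divide and conquer: split the tags in half, partition each half
--     recursively, and merge the two partitions with set unions."""
--     tagList = list(tags)
--
--     def solve(lo, hi):
--         if lo == hi:
--             return {'static': set(), 'dynamic': set()}
--         if hi - lo == 1:
--             tag = tagList[lo]
--             if tag.startswith('[') and ':' in tag:
--                 return {'static': set(), 'dynamic': {tag}}
--             return {'static': {tag}, 'dynamic': set()}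
--         mid = (lo + hi) // 2
--         left = solve(lo, mid)
--         right = solve(mid, hi)
--         return {'static': left['static'] | right['static'],
--                 'dynamic': left['dynamic'] | right['dynamic']}
--
--     return solve(0, len(tagList))
-- ===== Notes on version B (the rewrite author's own statement) =====
-- stated objective: alternative
-- what changed: Replaces A's single accumulating two-branch loop by a divide-and-conquer recursion that partitions each half of the tags independently and merges the halves' partitions with set unions.
import Mathlib
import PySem

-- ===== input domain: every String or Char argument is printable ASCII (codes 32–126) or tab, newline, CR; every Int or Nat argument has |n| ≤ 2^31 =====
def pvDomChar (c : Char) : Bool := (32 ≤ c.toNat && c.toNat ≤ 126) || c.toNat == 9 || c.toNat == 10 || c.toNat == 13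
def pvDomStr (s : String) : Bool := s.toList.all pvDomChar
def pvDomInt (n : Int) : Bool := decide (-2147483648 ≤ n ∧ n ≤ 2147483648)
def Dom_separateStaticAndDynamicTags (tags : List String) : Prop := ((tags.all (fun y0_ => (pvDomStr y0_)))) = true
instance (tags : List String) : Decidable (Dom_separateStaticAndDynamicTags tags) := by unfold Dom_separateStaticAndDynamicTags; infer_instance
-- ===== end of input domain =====

-- B replaces A's accumulating two-branch loop by divide and conquer: partition
-- each half of the tags recursively and merge with set unions (objective: alternative).

-- ===== PORT A =====
-- two accumulating sets, one two-branch loop over tags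
def separateStaticAndDynamicTags (tags : List String) : List (String × List String) :=
  let p := tags.foldl
    (fun (acc : PySem.Set String × PySem.Set String) tag =>
      if PySem.Str.startswith tag "[" && PySem.Str.isIn ":" tag then
        (acc.1, PySem.Set.add acc.2 tag)
      else
        (PySem.Set.add acc.1 tag, acc.2))
    (PySem.Set.empty, PySem.Set.empty)
  [("static", p.1), ("dynamic", p.2)]

-- ===== PORT B =====
def pvPred (tag : String) : Bool := PySem.Str.startswith tag "[" && PySem.Str.isIn ":" tag

-- solve(lo, hi): Python's index pair (lo, hi) into tagList is represented by the
-- sublist tagList[lo:hi]; mid = (lo+hi)//2 splits it after (hi-lo)//2 elements.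
def pvSolve : List String → PySem.Set String × PySem.Set String
  | [] => (PySem.Set.empty, PySem.Set.empty)
  | [tag] =>
      if pvPred tag then (PySem.Set.empty, [tag]) else ([tag], PySem.Set.empty)
  | t0 :: t1 :: rest =>
      let l := t0 :: t1 :: rest
      let mid := l.length / 2
      let left := pvSolve (l.take mid)
      let right := pvSolve (l.drop mid)
      (PySem.Set.union left.1 right.1, PySem.Set.union left.2 right.2)
termination_by l => l.length
decreasing_by
  · simp [List.length_take]; omega
  · simp [List.length_drop]; omega

def separateStaticAndDynamicTags_alt (tags : List String) : List (String × List String) :=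
  let p := pvSolve tags
  [("static", p.1), ("dynamic", p.2)]

-- ===== PRECONDITION & SPEC =====
def Spec_separateStaticAndDynamicTags (tags : List String) (out : List (String × List String)) : Prop := out = separateStaticAndDynamicTags_alt tags
instance (tags : List String) (out : List (String × List String)) : Decidable (Spec_separateStaticAndDynamicTags tags out) := by unfold Spec_separateStaticAndDynamicTags; infer_instance

-- ===== CLAIM (what is proved, stated in full; the proofs are below) =====
def Claim_equal_separateStaticAndDynamicTags : Prop := ∀ (tags : List String), Dom_separateStaticAndDynamicTags tags → Spec_separateStaticAndDynamicTags tags (separateStaticAndDynamicTags tags)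

-- ===== LEMMAS AND PROOFS =====

-- A's fold over a two-branch body splits into two independent Set.add folds over
-- the non-matching and matching tags.
theorem pv_fold_split (q : String → Bool) (tags : List String)
    (s d : PySem.Set String) :
    tags.foldl
      (fun (acc : PySem.Set String × PySem.Set String) tag =>
        if q tag then (acc.1, PySem.Set.add acc.2 tag)
        else (PySem.Set.add acc.1 tag, acc.2)) (s, d)
    = ((tags.filter (fun t => !q t)).foldl PySem.Set.add s,
       (tags.filter q).foldl PySem.Set.add d) := by
  induction tags generalizing s d with
  | nil => simp
  | cons x xs ih => by_cases h : q x = true <;> simp [h, ih]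

-- updating a set with set(ys) is the same as updating it with ys
theorem pv_update_ofList (s : PySem.Set String) (ys : List String) :
    PySem.Set.update s (PySem.Set.ofList ys) = PySem.Set.update s ys := by
  rw [PySem.Set.update_eq_append_filter, PySem.Set.update_eq_append_filter,
    PySem.Set.ofList_ofList]

-- the divide-and-conquer partition computes set(filter(not q)) and set(filter q)
theorem pv_solve_eq (l : List String) :
    pvSolve l = (PySem.Set.ofList (l.filter (fun t => !pvPred t)),
                 PySem.Set.ofList (l.filter pvPred)) := by
  fun_induction pvSolve l with
  | case1 => rfl
  | case2 tag h => simp [h, PySem.Set.ofList, PySem.Set.empty, PySem.Set.add]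
  | case3 tag h => simp [h, PySem.Set.ofList, PySem.Set.empty, PySem.Set.add]
  | case4 t0 t1 rest l mid left right ihl ihr =>
      have hsplit : l = l.take mid ++ l.drop mid := (List.take_append_drop mid l).symm
      simp only [left, right, ihl, ihr, PySem.Set.union]
      rw [pv_update_ofList, pv_update_ofList, ← PySem.Set.ofList_append,
        ← PySem.Set.ofList_append, ← List.filter_append, ← List.filter_append,
        List.take_append_drop]

-- ===== VERDICT (by name: the statement is the Claim_ definition above) =====
theorem separateStaticAndDynamicTags_spec : Claim_equal_separateStaticAndDynamicTags := by
  intro tags _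
  simp only [Spec_separateStaticAndDynamicTags, separateStaticAndDynamicTags,
    separateStaticAndDynamicTags_alt, pv_solve_eq, pv_fold_split, PySem.Set.empty,
    ← PySem.Set.ofList_eq_foldl, pvPred]
  rfl
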